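-- pv_equiv track=rewrite | github.com/ChanukOh/noob | 프로그래머스/2/152996. 시소 짝꿍/시소 짝꿍.py | solution
-- ===== SOURCE A (Python) =====
-- def solution(weights):
--     answer = 0
--     count_map = {}
--     for weight in weights:
--         if weight in count_map:
--             count_map[weight] += 1
--         else:
--             count_map[weight] = 1
--     unique_weights = sorted(count_map.keys())
--     n = len(unique_weights)
--     for i in range(n):
--         a = unique_weights[i]
--         for j in range(i, n):
--             b = unique_weights[j]
--             if (a == b or
--                 a * 3 == 2 * b or a * 2 == b or  a == b * 2 or
--                 a * 3 == 4 * b or a * 4 == 3 * b or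
--                 a * 2 == 3 * b):
--
--                 if a == b:
--                     answer += count_map[a] * (count_map[a] - 1) // 2
--                 else:
--                     answer += count_map[a] * count_map[b]
--     return answer
-- ===== SOURCE B (Python) =====
-- def solution(weights):
--     answer = 0
--     seen = {}
--     for w in weights:
--         answer += seen.get(w, 0)
--         partners = set()
--         for num, den in ((2, 1), (1, 2), (3, 2), (2, 3), (4, 3), (3, 4)):
--             if (w * num) % den == 0:
--                 partners.add(w * num // den)
--         partners.discard(w)
--         for p in partners:
--             answer += seen.get(p, 0)
--         seen[w] = seen.get(w, 0) + 1
--     return answer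
-- ===== Notes on version B (the rewrite author's own statement) =====
-- stated objective: faster
-- what changed: Replaces the O(k^2) double loop over all sorted unique-weight pairs by a single pass that, for each weight, looks up only its at most seven fixed-ratio partner values in a running hash counter.
import Mathlib
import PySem

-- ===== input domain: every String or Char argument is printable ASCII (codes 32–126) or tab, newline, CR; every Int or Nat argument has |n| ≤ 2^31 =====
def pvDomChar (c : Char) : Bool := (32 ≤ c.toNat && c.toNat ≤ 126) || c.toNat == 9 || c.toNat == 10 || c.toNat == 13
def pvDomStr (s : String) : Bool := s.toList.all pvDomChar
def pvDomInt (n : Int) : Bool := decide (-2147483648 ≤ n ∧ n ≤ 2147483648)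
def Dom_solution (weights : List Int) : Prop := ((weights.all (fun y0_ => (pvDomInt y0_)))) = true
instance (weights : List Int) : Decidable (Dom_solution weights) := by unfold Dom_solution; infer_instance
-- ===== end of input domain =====

-- B replaces A's quadratic double loop over all sorted unique-weight pairs by a single pass that
-- looks up each weight's at most seven fixed-ratio partner values in a running counter (objective: faster).

-- ===== PORT A =====
def solution (weights : List Int) : Int :=
  let countMap := weights.foldl
    (fun d w => if d.contains w then d.insert w (d.getD w 0 + 1) else d.insert w 1)
    PySem.Dict.empty
  let uniqueWeights := PySem.List.sorted countMap.keys (fun x => x) false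
  let n : Int := PySem.List.len uniqueWeights
  (PySem.List.pyRange 0 n 1).foldl (fun answer i =>
    let a := PySem.List.pyGetD uniqueWeights i 0
    (PySem.List.pyRange i n 1).foldl (fun answer j =>
      let b := PySem.List.pyGetD uniqueWeights j 0
      if a == b || a * 3 == 2 * b || a * 2 == b || a == b * 2 ||
         a * 3 == 4 * b || a * 4 == 3 * b || a * 2 == 3 * b then
        if a == b then
          answer + PySem.Int.floordiv (countMap.getD a 0 * (countMap.getD a 0 - 1)) 2
        else
          answer + countMap.getD a 0 * countMap.getD b 0
      else answer) answer) 0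

-- ===== PORT B =====
def pvRatios : List (Int × Int) := [(2, 1), (1, 2), (3, 2), (2, 3), (4, 3), (3, 4)]

def pvPartners (w : Int) : PySem.Set Int :=
  PySem.Set.discard
    (pvRatios.foldl (fun s nd =>
      if PySem.Int.mod (w * nd.1) nd.2 == 0 then
        PySem.Set.add s (PySem.Int.floordiv (w * nd.1) nd.2)
      else s) PySem.Set.empty) w

def solution_alt (weights : List Int) : Int :=
  (weights.foldl (fun st w =>
      let answer := st.1 + st.2.getD w 0 + ((pvPartners w).map (fun p => st.2.getD p 0)).sum
      (answer, st.2.insert w (st.2.getD w 0 + 1)))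
    ((0 : Int), (PySem.Dict.empty : PySem.Dict Int Int))).1

-- ===== PRECONDITION & SPEC =====
def Spec_solution (weights : List Int) (out : Int) : Prop := out = solution_alt weights
instance (weights : List Int) (out : Int) : Decidable (Spec_solution weights out) := by unfold Spec_solution; infer_instance

-- ===== CLAIM (what is proved, stated in full; the proofs are below) =====
def Claim_equal_solution : Prop := ∀ (weights : List Int), Dom_solution weights → Spec_solution weights (solution weights)

-- ===== LEMMAS AND PROOFS =====
def bal (a b : Int) : Bool :=
  a == b || a * 3 == 2 * b || a * 2 == b || a == b * 2 ||
  a * 3 == 4 * b || a * 4 == 3 * b || a * 2 == 3 * b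
def cc (c : Int) : Int := PySem.Int.floordiv (c * (c - 1)) 2
def pairCount : List Int → Int
  | [] => 0
  | x :: t => (t.countP (fun y => bal x y) : Int) + pairCount t
lemma bal_refl (a : Int) : bal a a = true := by simp [bal]
lemma bal_symm (a b : Int) : bal a b = bal b a := by
  rw [Bool.eq_iff_iff]; simp [bal]; omega
lemma cc_succ (c : Int) (h : 0 ≤ c) : cc (c + 1) = cc c + c := by
  unfold cc
  rw [PySem.Int.floordiv_eq_ediv_of_pos (by omega), PySem.Int.floordiv_eq_ediv_of_pos (by omega)]
  have h2 : (c + 1) * (c + 1 - 1) = c * (c - 1) + 2 * c := by ring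
  rw [h2]; omega
lemma countP_split (p : Int → Bool) (a : Int) (t : List Int) :
    t.countP p = (if p a then t.count a else 0) + t.countP (fun y => !(y == a) && p y) := by
  induction t with
  | nil => simp
  | cons x t ih =>
    by_cases hx : x = a
    · subst hx
      by_cases hp : p x
      · simp [List.count_cons, hp, ih]; omega
      · simp [List.count_cons, hp, ih]
    · by_cases hp : p x
      · simp [List.countP_cons, hp, hx, ih]
        split <;> omega
      · simp [List.countP_cons, hp, hx, ih]
lemma pairCount_remove (xs : List Int) (a : Int) :
    pairCount xs
      = cc (xs.count a) + (xs.count a : Int) * (xs.countP (fun y => !(y == a) && bal a y) : Int)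
        + pairCount (xs.filter (fun y => !(y == a))) := by
  induction xs with
  | nil => simp [pairCount, cc]
  | cons x t ih =>
    by_cases hx : x = a
    · subst hx
      have hsplit := countP_split (fun y => bal x y) x t
      have hcc : cc ((t.count x : Int) + 1) = cc (t.count x) + t.count x :=
        cc_succ _ (by positivity)
      simp only [pairCount, List.count_cons_self, List.filter_cons, beq_self_eq_true,
        Bool.not_true, List.countP_cons, bal_refl, if_true] at *
      push_cast at *
      rw [hsplit, ih]
      simp [hcc]
      ring
    · have hx' : (x == a) = false := by simp [hx]
      have hsplit := countP_split (fun y => bal x y) a t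
      have hfc : (t.filter (fun y => !(y == a))).countP (fun y => bal x y)
          = t.countP (fun y => !(y == a) && bal x y) := by
        rw [List.countP_filter]
        apply List.countP_congr; intro y _; simp [Bool.and_comm]
      simp only [pairCount, List.count_cons, List.countP_cons, List.filter_cons, hx',
        Bool.not_false, if_true, bal_symm x a] at *
      rw [hsplit, ih, hfc]
      push_cast
      split <;> rename_i hba <;> simp [hba] <;> ring
lemma sum_count_nodup (S : List Int) (p : Int → Bool) (xs : List Int) (hS : S.Nodup) :
    (S.map (fun b => if p b then (xs.count b : Int) else 0)).sum
      = (xs.countP (fun y => decide (y ∈ S) && p y) : Int) := by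
  induction S with
  | nil => simp
  | cons b S ih =>
    have hb : b ∉ S := (List.nodup_cons.mp hS).1
    have hS' : S.Nodup := (List.nodup_cons.mp hS).2
    have key : xs.countP (fun y => decide (y ∈ b :: S) && p y)
        = (if p b then xs.count b else 0) + xs.countP (fun y => decide (y ∈ S) && p y) := by
      have h1 := countP_split (fun y => decide (y ∈ b :: S) && p y) b xs
      have h2 : xs.countP (fun y => !(y == b) && (decide (y ∈ b :: S) && p y))
          = xs.countP (fun y => decide (y ∈ S) && p y) := by
        apply List.countP_congr
        intro y _
        by_cases hyb : y = b
        · simp [hyb, hb]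
        · simp [hyb]
      rw [h1, h2]
      simp
    simp only [List.map_cons, List.sum_cons, ih hS', key]
    push_cast
    split <;> ring
def gsum (m : Int → Int) : List Int → Int
  | [] => 0
  | a :: rest =>
      cc (m a) + (rest.map (fun b => if bal a b then m a * m b else 0)).sum + gsum m rest
lemma gsum_congr (m m' : Int → Int) (K : List Int) (h : ∀ v ∈ K, m v = m' v) :
    gsum m K = gsum m' K := by
  induction K with
  | nil => rfl
  | cons a rest ih =>
    have hmap : rest.map (fun b => if bal a b then m a * m b else 0)
        = rest.map (fun b => if bal a b then m' a * m' b else 0) :=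
      List.map_congr_left (fun b hb => by rw [h a (by simp), h b (by simp [hb])])
    simp only [gsum]
    rw [hmap, h a (by simp), ih (fun v hv => h v (by simp [hv]))]
lemma gsum_eq_pairCount (K : List Int) (xs : List Int) (hnd : K.Nodup)
    (hmem : ∀ v, v ∈ K ↔ v ∈ xs) :
    gsum (fun v => (xs.count v : Int)) K = pairCount xs := by
  induction K generalizing xs with
  | nil =>
    have : xs = [] := by
      cases xs with
      | nil => rfl
      | cons x t => exact absurd ((hmem x).mpr (by simp)) (by simp)
    simp [this, gsum, pairCount]
  | cons a rest ih =>
    have ha : a ∉ rest := (List.nodup_cons.mp hnd).1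
    have hnd' : rest.Nodup := (List.nodup_cons.mp hnd).2
    set xs' := xs.filter (fun y => !(y == a)) with hxs'
    have hmem' : ∀ v, v ∈ rest ↔ v ∈ xs' := by
      intro v
      constructor
      · intro hv
        have hva : v ≠ a := by rintro rfl; exact ha hv
        simp [hxs', List.mem_filter, (hmem v).mp (by simp [hv]), hva]
      · intro hv
        rcases List.mem_filter.mp hv with ⟨hvx, hvna⟩
        have := (hmem v).mpr hvx
        simp at hvna
        simpa [hvna] using this
    have hcount' : ∀ v ∈ rest, xs'.count v = xs.count v := by
      intro v hv
      have hva : v ≠ a := by rintro rfl; exact ha hv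
      simp [hxs', List.count_filter, hva]
    have ihx := ih xs' hnd' hmem'
    have hg : gsum (fun v => (xs'.count v : Int)) rest = gsum (fun v => (xs.count v : Int)) rest := by
      apply gsum_congr; intro v hv; rw [hcount' v hv]
    have hcross : (rest.map (fun b => if bal a b then (xs.count a : Int) * xs.count b else 0)).sum
        = (xs.count a : Int) * (xs.countP (fun y => !(y == a) && bal a y) : Int) := by
      have factored : (rest.map (fun b => if bal a b then (xs.count a : Int) * xs.count b else 0))
          = rest.map (fun b => (xs.count a : Int) * (if bal a b then (xs.count b : Int) else 0)) :=
        List.map_congr_left (fun b _ => by split <;> simp)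
      rw [factored, List.sum_map_mul_left, sum_count_nodup rest (fun b => bal a b) xs hnd']
      congr 2
      apply List.countP_congr
      intro y hy
      by_cases hya : y = a
      · simp [hya, ha]
      · have hmm : y ∈ rest ↔ True := by
          simp only [iff_true]
          have : y ∈ a :: rest := (hmem y).mpr hy
          simpa [hya] using this
        simp [hya, hmm]
    rw [pairCount_remove xs a, ← hxs']
    simp only [gsum, hcross, ← hg, ihx]

lemma inner_fold_eq (cm : PySem.Dict Int Int) (a : Int) (l : List Int) : ∀ (ans : Int),
    l.foldl (fun answer b =>
        if a == b || a * 3 == 2 * b || a * 2 == b || a == b * 2 ||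
           a * 3 == 4 * b || a * 4 == 3 * b || a * 2 == 3 * b then
          if a == b then answer + cc (cm.getD a 0)
          else answer + cm.getD a 0 * cm.getD b 0
        else answer) ans
      = ans + (l.map (fun b =>
          if bal a b then (if a = b then cc (cm.getD a 0) else cm.getD a 0 * cm.getD b 0)
          else 0)).sum := by
  induction l with
  | nil => simp
  | cons b l ihl =>
    intro ans
    simp only [List.foldl_cons, List.map_cons, List.sum_cons, ihl, bal]
    by_cases hb : (a == b || a * 3 == 2 * b || a * 2 == b || a == b * 2 ||
        a * 3 == 4 * b || a * 4 == 3 * b || a * 2 == 3 * b) = true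
    · simp only [hb, if_true]
      by_cases hab : a = b <;> simp [hab] <;> ring
    · simp only [Bool.not_eq_true] at hb
      simp only [hb, Bool.false_eq_true, if_false]
      ring

lemma outer_loop_eq (uniq : List Int) (cm : PySem.Dict Int Int) (hnd : uniq.Nodup) :
    ∀ (k : Nat), k ≤ uniq.length → ∀ (ans : Int),
    (PySem.List.pyRange (k : Int) (PySem.List.len uniq) 1).foldl (fun answer i =>
      let a := PySem.List.pyGetD uniq i 0
      (PySem.List.pyRange i (PySem.List.len uniq) 1).foldl (fun answer j =>
        let b := PySem.List.pyGetD uniq j 0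
        if a == b || a * 3 == 2 * b || a * 2 == b || a == b * 2 ||
           a * 3 == 4 * b || a * 4 == 3 * b || a * 2 == 3 * b then
          if a == b then answer + cc (cm.getD a 0)
          else answer + cm.getD a 0 * cm.getD b 0
        else answer) answer) ans
      = ans + gsum (fun v => cm.getD v 0) (uniq.drop k) := by
  intro k
  induction hk : uniq.length - k generalizing k with
  | zero =>
    intro hle ans
    have hk' : k = uniq.length := by omega
    subst hk'
    rw [PySem.List.pyRange_one_eq_nil (by simp [PySem.List.len]), List.drop_length]
    simp [gsum]
  | succ n ihn =>
    intro hle ans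
    have hklt : k < uniq.length := by omega
    rw [PySem.List.pyRange_one_cons (by simp [PySem.List.len]; omega), List.foldl_cons]
    have hdrop : uniq.drop k = uniq[k] :: uniq.drop (k + 1) :=
      List.drop_eq_getElem_cons hklt
    have hget : PySem.List.pyGetD uniq (k : Int) 0 = uniq[k] := by
      rw [PySem.List.pyGetD_natCast]
      simp [hklt, List.getD_eq_getElem?_getD, List.getElem?_eq_getElem hklt]
    have hinner := inner_fold_eq cm uniq[k]
    have hfr : ∀ init : Int,
        (PySem.List.pyRange ((k : Int)) (PySem.List.len uniq) 1).foldl (fun answer j =>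
          let b := PySem.List.pyGetD uniq j 0
          if uniq[k] == b || uniq[k] * 3 == 2 * b || uniq[k] * 2 == b || uniq[k] == b * 2 ||
             uniq[k] * 3 == 4 * b || uniq[k] * 4 == 3 * b || uniq[k] * 2 == 3 * b then
            if uniq[k] == b then answer + cc (cm.getD uniq[k] 0)
            else answer + cm.getD uniq[k] 0 * cm.getD (b) 0
          else answer) init
        = (uniq.drop k).foldl (fun answer b =>
            if uniq[k] == b || uniq[k] * 3 == 2 * b || uniq[k] * 2 == b || uniq[k] == b * 2 ||
               uniq[k] * 3 == 4 * b || uniq[k] * 4 == 3 * b || uniq[k] * 2 == 3 * b then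
              if uniq[k] == b then answer + cc (cm.getD uniq[k] 0)
              else answer + cm.getD uniq[k] 0 * cm.getD (b) 0
            else answer) init := by
      intro init
      exact PySem.List.foldl_pyRange_pyGetD (xs := uniq) (a := (k : Int)) (d := 0)
        (f := fun answer b =>
          if uniq[k] == b || uniq[k] * 3 == 2 * b || uniq[k] * 2 == b || uniq[k] == b * 2 ||
             uniq[k] * 3 == 4 * b || uniq[k] * 4 == 3 * b || uniq[k] * 2 == 3 * b then
            if uniq[k] == b then answer + cc (cm.getD uniq[k] 0)
            else answer + cm.getD uniq[k] 0 * cm.getD (b) 0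
          else answer) (init := init) (by positivity)
    have hnotmem : uniq[k] ∉ uniq.drop (k + 1) := by
      have h1 : (uniq.drop k).Nodup := hnd.sublist (List.drop_sublist k uniq)
      rw [hdrop] at h1
      exact (List.nodup_cons.mp h1).1
    have htail : (uniq.drop (k + 1)).map (fun b =>
          if bal uniq[k] b then (if uniq[k] = b then cc (cm.getD uniq[k] 0)
            else cm.getD uniq[k] 0 * cm.getD b 0) else 0)
        = (uniq.drop (k + 1)).map (fun b =>
          if bal uniq[k] b then cm.getD uniq[k] 0 * cm.getD b 0 else 0) := by
      apply List.map_congr_left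
      intro b hb
      have hne : uniq[k] ≠ b := by rintro rfl; exact hnotmem hb
      simp [hne]
    have harg : ((k : Int) + 1) = (((k + 1 : Nat)) : Int) := by push_cast; ring
    simp only [hget]
    rw [hfr, inner_fold_eq, harg, ihn (k + 1) (by omega) (by omega), hdrop]
    simp only [gsum, List.map_cons, List.sum_cons, bal_refl, if_true, htail]
    simp
    ring
lemma buildCount_eq (weights : List Int) :
    weights.foldl
      (fun d w => if d.contains w then d.insert w (d.getD w 0 + 1) else d.insert w 1)
      PySem.Dict.empty = PySem.Dict.counter weights := by
  rw [← PySem.Dict.foldl_insert_getD_add_one_eq_counter]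
  apply PySem.List.foldl_congr_mem
  intro d w _
  by_cases h : d.contains w
  · simp [h]
  · simp only [h, if_false, Bool.false_eq_true]
    have h0 : d.getD w 0 = 0 :=
      PySem.Dict.getD_of_not_contains (d := d) (k := w) (h := by simpa using h) 0
    rw [h0]
    norm_num

lemma cc_spec (c : Int) : PySem.Int.floordiv (c * (c - 1)) 2 = cc c := rfl

lemma solution_eq_pairCount (weights : List Int) : solution weights = pairCount weights := by
  unfold solution
  simp only [buildCount_eq, PySem.Dict.keys_counter]
  set uniq := PySem.List.sorted (PySem.Set.ofList weights) (fun x => x) false with huniq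
  have hnd : uniq.Nodup :=
    (PySem.List.sorted_perm _ _ _).nodup_iff.mpr (PySem.Set.nodup_ofList _)
  have hmem : ∀ v, v ∈ uniq ↔ v ∈ weights := fun v => by
    rw [huniq, PySem.List.mem_sorted, PySem.Set.mem_ofList]
  simp only [cc_spec]
  have h0 := outer_loop_eq uniq (PySem.Dict.counter weights) hnd 0 (by omega) 0
  simp only [Nat.cast_zero, List.drop_zero] at h0
  rw [h0]
  have hcongr := gsum_congr (fun v => (PySem.Dict.counter weights).getD v 0)
      (fun v => (weights.count v : Int)) uniq
      (fun v _ => PySem.Dict.getD_counter weights v)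
  rw [hcongr, gsum_eq_pairCount uniq weights hnd hmem]
  ring

lemma mem_ite_add (c : Bool) (s : List Int) (e y : Int) :
    y ∈ (if c = true then PySem.Set.add s e else s) ↔ (c = true ∧ y = e) ∨ y ∈ s := by
  split <;> rename_i hc <;> simp [PySem.Set.mem_add, hc] <;> tauto

lemma mem_pvPartners (v w : Int) : v ∈ pvPartners w ↔ (bal v w = true ∧ v ≠ w) := by
  unfold pvPartners pvRatios
  rw [PySem.Set.mem_discard]
  simp only [List.foldl, mem_ite_add]
  simp only [beq_iff_eq, PySem.Int.mod_eq_zero_iff_dvd,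
    PySem.Int.floordiv_eq_ediv_of_pos (show (0:Int) < 1 by norm_num),
    PySem.Int.floordiv_eq_ediv_of_pos (show (0:Int) < 2 by norm_num),
    PySem.Int.floordiv_eq_ediv_of_pos (show (0:Int) < 3 by norm_num),
    PySem.Int.floordiv_eq_ediv_of_pos (show (0:Int) < 4 by norm_num),
    PySem.Set.empty, List.mem_nil_iff, bal, Bool.or_eq_true, beq_iff_eq]
  constructor
  · rintro ⟨h, hne⟩
    refine ⟨?_, hne⟩
    rcases h with ⟨hd, he⟩ | ⟨hd, he⟩ | ⟨hd, he⟩ | ⟨hd, he⟩ | ⟨hd, he⟩ | ⟨hd, he⟩ | h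
    all_goals try (obtain ⟨k, hk⟩ := hd; rw [hk] at he; omega)
    exact absurd h (by trivial)
  · rintro ⟨h, hne⟩
    refine ⟨?_, hne⟩
    rcases h with ((((((h | h) | h) | h) | h) | h) | h)
    · exact absurd h hne
    · exact .inr (.inr (.inl ⟨⟨v, by omega⟩, by omega⟩))
    · exact .inr (.inr (.inr (.inr (.inl ⟨⟨v, by omega⟩, by omega⟩))))
    · exact .inr (.inr (.inr (.inr (.inr (.inl ⟨⟨v, by omega⟩, by omega⟩)))))
    · exact .inr (.inl ⟨⟨v, by omega⟩, by omega⟩)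
    · exact .inl ⟨⟨v, by omega⟩, by omega⟩
    · exact .inr (.inr (.inr (.inl ⟨⟨v, by omega⟩, by omega⟩)))

lemma nodup_pvPartners (w : Int) : (pvPartners w).Nodup := by
  unfold pvPartners
  apply PySem.Set.nodup_discard
  have : ∀ (l : List (Int × Int)) (s : List Int), s.Nodup →
      (l.foldl (fun s nd =>
        if PySem.Int.mod (w * nd.1) nd.2 == 0 then
          PySem.Set.add s (PySem.Int.floordiv (w * nd.1) nd.2)
        else s) s).Nodup := by
    intro l
    induction l with
    | nil => intro s hs; simpa
    | cons nd l ihl =>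
      intro s hs
      simp only [List.foldl_cons]
      split
      · exact ihl _ (PySem.Set.nodup_add _ _ hs)
      · exact ihl _ hs
  exact this _ _ (by simp [PySem.Set.empty])

lemma sum_count_nodup' (S xs : List Int) (hS : S.Nodup) :
    (S.map (fun b => (xs.count b : Int))).sum = (xs.countP (fun y => decide (y ∈ S)) : Int) := by
  simpa using sum_count_nodup S (fun _ => true) xs hS

lemma alt_loop (t : List Int) : ∀ (p : List Int) (ans : Int) (d : PySem.Dict Int Int),
    (∀ v, d.getD v 0 = (p.count v : Int)) →
    (t.foldl (fun st w =>
      let answer := st.1 + st.2.getD w 0 + ((pvPartners w).map (fun x => st.2.getD x 0)).sum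
      (answer, st.2.insert w (st.2.getD w 0 + 1)))
      (ans, d)).1
    = ans + (t.map (fun u => (p.countP (fun v => bal v u) : Int))).sum + pairCount t := by
  induction t with
  | nil => intro p ans d hd; simp [pairCount]
  | cons w t' ih =>
    intro p ans d hd
    have hd' : ∀ v, (d.insert w (d.getD w 0 + 1)).getD v 0 = ((p ++ [w]).count v : Int) := by
      intro v
      rw [PySem.Dict.getD_insert]
      by_cases hvw : v = w
      · subst hvw
        simp [hd v, List.count_append]
      · simp [hvw, Ne.symm hvw, hd v, List.count_append]
    have hpart : ((pvPartners w).map (fun x => ((p.count x : Int)))).sum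
        = (p.countP (fun y => !(y == w) && bal y w) : Int) := by
      rw [sum_count_nodup' _ p (nodup_pvPartners w)]
      congr 1
      apply List.countP_congr
      intro y _
      rw [Bool.eq_iff_iff]
      simp only [decide_eq_true_eq, Bool.and_eq_true, Bool.not_eq_true', beq_eq_false_iff_ne]
      rw [mem_pvPartners]
      tauto
    have hsplitw : (p.countP (fun v => bal v w) : Int)
        = (p.count w : Int) + (p.countP (fun y => !(y == w) && bal y w) : Int) := by
      have h1 := countP_split (fun v => bal v w) w p
      rw [h1, bal_refl]
      push_cast
      simp
    have hcross : (t'.map (fun u => ((p ++ [w]).countP (fun v => bal v u) : Int))).sum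
        = (t'.map (fun u => (p.countP (fun v => bal v u) : Int))).sum
          + (t'.countP (fun u => bal w u) : Int) := by
      have hone : (t'.map (fun u => ((p ++ [w]).countP (fun v => bal v u) : Int)))
          = (t'.map (fun u => (p.countP (fun v => bal v u) : Int)
              + (if bal w u then (1 : Int) else 0))) := by
        apply List.map_congr_left
        intro u _
        rw [List.countP_append]
        push_cast
        by_cases hbu : bal w u <;> simp [List.countP_cons, hbu]
      rw [hone, PySem.List.sum_map_add_int, PySem.List.sum_map_ite_one_zero]
    simp only [List.foldl_cons]
    rw [ih (p ++ [w]) _ _ hd']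
    simp only [List.map_cons, List.sum_cons, pairCount, hpart, hd, hcross, hsplitw]
    push_cast
    ring

lemma solution_alt_eq_pairCount (weights : List Int) : solution_alt weights = pairCount weights := by
  unfold solution_alt
  rw [alt_loop weights [] 0 PySem.Dict.empty (fun v => by simp)]
  simp

-- ===== VERDICT (by name: the statement is the Claim_ definition above) =====
theorem solution_spec : Claim_equal_solution := by
  intro weights _
  unfold Spec_solution
  rw [solution_eq_pairCount, solution_alt_eq_pairCount]
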